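-- pv_equiv track=rewrite | github.com/tartaponei/Tarog | pythagorean.py | verificar_vogais
-- ===== SOURCE A (Python) =====
-- MESTRES = (11, 22, 33, 44, 55, 66, 77, 88, 99)
--
-- ALGARISMOS = (1, 2, 3, 4, 5, 6, 7, 8, 9)
--
-- def verificar_vogais(nome, sons_w):
--     valor = 0
--
--     contagem_w = 0
--     for letra in nome:
--         if letra == "a": valor += 1
--         elif letra == "e": valor += 5
--         elif letra == "i" or letra == "y": valor += 9
--         elif letra == "o": valor += 6
--         elif letra == "u": valor += 3
--         elif letra == "w":
--             contagem_w += 1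
--
--             if sons_w[contagem_w-1] == "u": valor += 3
--
--     valor = reducao_teosofica(valor)
--     return valor
--
-- def reducao_teosofica(num):
--     while num not in ALGARISMOS:
--         if num not in MESTRES:
--             alg = 0
--             for algarismo in str(num):
--                 alg += int(algarismo)
--
--             num = alg
--         else:
--             break
--
--     return num
-- ===== SOURCE B (Python) =====
-- def verificar_vogais(nome, sons_w):
--     # one counting pass into a table, arithmetic value formula, arithmetic digit reduction
--     cnt = {}
--     for letra in nome:
--         cnt[letra] = cnt.get(letra, 0) + 1
--     valor = (cnt.get('a', 0)
--              + 5 * cnt.get('e', 0)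
--              + 9 * (cnt.get('i', 0) + cnt.get('y', 0))
--              + 6 * cnt.get('o', 0)
--              + 3 * cnt.get('u', 0))
--     for i in range(cnt.get('w', 0)):
--         if sons_w[i] == "u":
--             valor += 3
--     while valor > 9 and not (valor % 11 == 0 and valor <= 99):
--         s, n = 0, valor
--         while n:
--             s += n % 10
--             n //= 10
--         valor = s
--     return valor
-- ===== Notes on version B (the rewrite author's own statement) =====
-- stated objective: alternative
-- what changed: B replaces A's branchy per-character accumulation with one counting pass into a dict plus an arithmetic value formula over the six counts, and replaces the string-based theosophic reduction (str/int round-trips, tuple membership) with an arithmetic %-// digit-sum loop whose stopping test is valor<=9 or (valor%11==0 and valor<=99).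
import Mathlib
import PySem

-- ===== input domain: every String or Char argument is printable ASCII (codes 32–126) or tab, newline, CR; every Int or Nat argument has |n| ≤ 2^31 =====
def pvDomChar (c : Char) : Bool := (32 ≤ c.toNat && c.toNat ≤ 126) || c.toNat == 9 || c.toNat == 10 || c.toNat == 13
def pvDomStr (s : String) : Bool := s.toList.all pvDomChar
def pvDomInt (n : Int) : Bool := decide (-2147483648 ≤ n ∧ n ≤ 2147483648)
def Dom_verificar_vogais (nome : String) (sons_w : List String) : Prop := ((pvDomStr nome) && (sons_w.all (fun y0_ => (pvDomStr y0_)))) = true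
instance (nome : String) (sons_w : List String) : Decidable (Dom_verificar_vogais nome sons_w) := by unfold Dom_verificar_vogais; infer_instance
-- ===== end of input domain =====

-- B replaces A's branchy per-character accumulation by one counting pass into a dict plus an
-- arithmetic value formula, and the string-based theosophic reduction by an arithmetic digit-sum
-- loop (objective: alternative; equivalence is about the return value, neither side mutates).

-- ===== PORT A =====
def ALGARISMOS : List Int := [1, 2, 3, 4, 5, 6, 7, 8, 9]
def MESTRES : List Int := [11, 22, 33, 44, 55, 66, 77, 88, 99]

-- int(algarismo) for one character of str(num); on Pre_ inputs num ≥ 0 so every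
-- character is a decimal digit and int() never raises (getD 0 is unreachable).
def pyDigitInt (c : Char) : Int := (PySem.Int.ofChars? [c]).getD 0

-- alg = 0; for algarismo in str(num): alg += int(algarismo)
def strDigitSum (num : Int) : Int :=
  (PySem.Int.toStr num).toList.foldl (fun alg c => alg + pyDigitInt c) 0

-- the while loop of reducao_teosofica; fuel num.toNat + 1 is enough on Pre_ inputs
-- (num ≥ 1 strictly decreases at every iteration), so exhaustion is unreachable there
def redA : Nat → Int → Int
  | 0, num => num
  | fuel + 1, num =>
    if num ∈ ALGARISMOS then num
    else if num ∉ MESTRES then redA fuel (strDigitSum num)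
    else num

-- the 'for letra in nome' loop, state (valor, contagem_w); none = IndexError on sons_w
def loopA (sw : List String) : List Char → Int → Int → Option Int
  | [], valor, _ => some valor
  | letra :: rest, valor, cw =>
    if letra = 'a' then loopA sw rest (valor + 1) cw
    else if letra = 'e' then loopA sw rest (valor + 5) cw
    else if letra = 'i' ∨ letra = 'y' then loopA sw rest (valor + 9) cw
    else if letra = 'o' then loopA sw rest (valor + 6) cw
    else if letra = 'u' then loopA sw rest (valor + 3) cw
    else if letra = 'w' then
      match PySem.List.pyGet? sw ((cw + 1) - 1) with
      | none => none                 -- IndexError: excluded by Pre_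
      | some s => loopA sw rest (if s = "u" then valor + 3 else valor) (cw + 1)
    else loopA sw rest valor cw

def verificar_vogais (nome : String) (sons_w : List String) : Int :=
  match loopA sons_w nome.toList 0 0 with
  | none => 0                        -- IndexError: excluded by Pre_
  | some valor => redA (valor.toNat + 1) valor

-- ===== PORT B =====
-- inner 'while n: s += n % 10; n //= 10' (fuel n.toNat + 1 is enough for n ≥ 0)
def digSumB : Nat → Int → Int → Int
  | 0, _, s => s
  | fuel + 1, n, s =>
    if n ≠ 0 then digSumB fuel (PySem.Int.floordiv n 10) (s + PySem.Int.mod n 10) else s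

-- outer 'while valor > 9 and not (valor % 11 == 0 and valor <= 99)'
def redB : Nat → Int → Int
  | 0, valor => valor
  | fuel + 1, valor =>
    if valor > 9 ∧ ¬(PySem.Int.mod valor 11 = 0 ∧ valor ≤ 99) then
      redB fuel (digSumB (valor.toNat + 1) valor 0)
    else valor

-- 'for i in range(cnt.get('w', 0)): if sons_w[i] == "u": valor += 3'; none = IndexError
def wLoopB (sw : List String) : List Int → Int → Option Int
  | [], valor => some valor
  | i :: rest, valor =>
    match PySem.List.pyGet? sw i with
    | none => none                   -- IndexError: excluded by Pre_
    | some s => wLoopB sw rest (if s = "u" then valor + 3 else valor)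

def verificar_vogais_alt (nome : String) (sons_w : List String) : Int :=
  let cnt : PySem.Dict Char Int :=
    nome.toList.foldl (fun d letra => d.modify letra 0 (· + 1)) PySem.Dict.empty
  let valor := cnt.getD 'a' 0 + 5 * cnt.getD 'e' 0
      + 9 * (cnt.getD 'i' 0 + cnt.getD 'y' 0) + 6 * cnt.getD 'o' 0 + 3 * cnt.getD 'u' 0
  match wLoopB sons_w (PySem.List.pyRange 0 (cnt.getD 'w' 0) 1) valor with
  | none => 0                        -- IndexError: excluded by Pre_
  | some v => redB (v.toNat + 1) v

-- ===== PRECONDITION & SPEC =====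
-- Pre_ excludes only inputs on which A does not return: those where nome contains more 'w'
-- than sons_w has entries (IndexError), and those whose vowel value is 0 — no vowel letter
-- and no 'w' whose sound is "u" — on which reducao_teosofica(0) loops forever.
def Pre_verificar_vogais (nome : String) (sons_w : List String) : Prop :=
  nome.toList.count 'w' ≤ sons_w.length ∧
  (0 < nome.toList.count 'a' + nome.toList.count 'e' + nome.toList.count 'i'
      + nome.toList.count 'o' + nome.toList.count 'u' + nome.toList.count 'y' ∨
   (∃ j ∈ List.range (nome.toList.count 'w'), sons_w[j]? = some "u"))
instance (nome : String) (sons_w : List String) : Decidable (Pre_verificar_vogais nome sons_w) := by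
  unfold Pre_verificar_vogais; infer_instance

def pvWitness_verificar_vogais : String × List String := ("ave", ["u"])

def Spec_verificar_vogais (nome : String) (sons_w : List String) (out : Int) : Prop := out = verificar_vogais_alt nome sons_w
instance (nome : String) (sons_w : List String) (out : Int) : Decidable (Spec_verificar_vogais nome sons_w out) := by unfold Spec_verificar_vogais; infer_instance

-- ===== CLAIM (what is proved, stated in full; the proofs are below) =====
def Claim_equal_verificar_vogais : Prop := ∀ (nome : String) (sons_w : List String), Dom_verificar_vogais nome sons_w → Pre_verificar_vogais nome sons_w → Spec_verificar_vogais nome sons_w (verificar_vogais nome sons_w)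

-- ===== LEMMAS AND PROOFS =====

-- the per-character vowel value of A's elif chain
def charVal (c : Char) : Int :=
  if c = 'a' then 1 else if c = 'e' then 5 else if c = 'i' ∨ c = 'y' then 9
  else if c = 'o' then 6 else if c = 'u' then 3 else 0

def sumVal : List Char → Int
  | [] => 0
  | c :: r => charVal c + sumVal r

theorem charVal_nonneg (c : Char) : 0 ≤ charVal c := by
  unfold charVal; split_ifs <;> norm_num

theorem sumVal_nonneg (l : List Char) : 0 ≤ sumVal l := by
  induction l with
  | nil => simp [sumVal]
  | cons c r ih => have := charVal_nonneg c; simp [sumVal]; omega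

-- B's count formula computes the same total as A's elif chain
theorem sumVal_eq_counts (l : List Char) :
    (l.count 'a' : Int) + 5 * l.count 'e' + 9 * ((l.count 'i' : Int) + l.count 'y')
      + 6 * l.count 'o' + 3 * l.count 'u' = sumVal l := by
  induction l with
  | nil => simp [sumVal]
  | cons c r ih =>
    have hc : ∀ d : Char, (((c :: r).count d : Nat) : Int)
        = r.count d + (if c = d then 1 else 0) := by
      intro d; by_cases h : c = d <;> simp [h]
      
    simp only [hc, sumVal, charVal]
    split_ifs <;> simp_all <;> omega

-- A's interleaved loop equals: full vowel total first, then the w-indices in order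
theorem loopA_eq (sw : List String) :
    ∀ (l : List Char) (v cw : Int), 0 ≤ cw →
      loopA sw l v cw
        = wLoopB sw (PySem.List.pyRange cw (cw + l.count 'w') 1) (v + sumVal l) := by
  intro l
  induction l with
  | nil =>
    intro v cw _
    simp [loopA, wLoopB, sumVal, PySem.List.pyRange_one_eq_nil (le_refl cw)]
  | cons c r ih =>
    intro v cw hcw
    by_cases hw : c = 'w'
    · subst hw
      have hcnt : (('w' :: r).count 'w' : Int) = r.count 'w' + 1 := by
        simp
      rw [hcnt]
      have hrange : PySem.List.pyRange cw (cw + ((r.count 'w' : Int) + 1)) 1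
          = cw :: PySem.List.pyRange (cw + 1) (cw + ((r.count 'w' : Int) + 1)) 1 := by
        apply PySem.List.pyRange_one_cons
        have : (0 : Int) ≤ r.count 'w' := by positivity
        omega
      rw [hrange]
      show (match PySem.List.pyGet? sw ((cw + 1) - 1) with
        | none => none
        | some s => loopA sw r (if s = "u" then v + 3 else v) (cw + 1)) = _
      have : (cw + 1) - 1 = cw := by ring
      rw [this]
      cases hg : PySem.List.pyGet? sw cw with
      | none => simp [wLoopB, hg]
      | some s =>
        simp only [wLoopB, hg]
        rw [ih _ (cw + 1) (by omega)]
        have hb : cw + ((r.count 'w' : Int) + 1) = (cw + 1) + r.count 'w' := by ring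
        rw [hb]
        have hsv : sumVal ('w' :: r) = sumVal r := by simp [sumVal, charVal]
        rw [hsv]
        congr 1
        split_ifs <;> ring
    · have hcount : ((c :: r).count 'w' : Int) = r.count 'w' := by
        simp [hw]
      have hstep : loopA sw (c :: r) v cw = loopA sw r (v + charVal c) cw := by
        show (if c = 'a' then loopA sw r (v + 1) cw
          else if c = 'e' then loopA sw r (v + 5) cw
          else if c = 'i' ∨ c = 'y' then loopA sw r (v + 9) cw
          else if c = 'o' then loopA sw r (v + 6) cw
          else if c = 'u' then loopA sw r (v + 3) cw
          else if c = 'w' then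
            (match PySem.List.pyGet? sw ((cw + 1) - 1) with
              | none => none
              | some s => loopA sw r (if s = "u" then v + 3 else v) (cw + 1))
          else loopA sw r v cw) = _
        unfold charVal
        split_ifs <;> simp_all
      rw [hstep, hcount, ih _ cw hcw]
      have : v + charVal c + sumVal r = v + sumVal (c :: r) := by simp [sumVal]; ring
      rw [this]

-- wLoopB returns a value once every index is in range, never below its accumulator,
-- and at least 3 above it when some listed index holds "u"
theorem wLoopB_spec (sw : List String) :
    ∀ (ids : List Int) (v : Int), (∀ i ∈ ids, 0 ≤ i ∧ i < (sw.length : Int)) →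
      ∃ r, wLoopB sw ids v = some r ∧ v ≤ r ∧
        ∀ i ∈ ids, sw[i.toNat]? = some "u" → v + 3 ≤ r := by
  intro ids
  induction ids with
  | nil => intro v _; exact ⟨v, rfl, le_refl v, by simp⟩
  | cons i rest ih =>
    intro v h
    obtain ⟨h0, h1⟩ := h i (List.mem_cons_self)
    rw [show wLoopB sw (i :: rest) v
        = (match PySem.List.pyGet? sw i with
            | none => none
            | some s => wLoopB sw rest (if s = "u" then v + 3 else v)) from rfl]
    rw [PySem.List.pyGet?_eq_some_getElem sw h0 h1]
    obtain ⟨r, hr, hvr, hall⟩ := ih (if sw[i.toNat] = "u" then v + 3 else v)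
      (fun j hj => h j (List.mem_cons_of_mem _ hj))
    refine ⟨r, hr, ?_, ?_⟩
    · split_ifs at hvr <;> omega
    · intro j hj hu
      rcases List.mem_cons.mp hj with h' | h'
      · subst h'
        have : sw[j.toNat] = "u" := by
          have := List.getElem?_eq_getElem (l := sw) (by omega : j.toNat < sw.length)
          rw [this] at hu; exact Option.some.inj hu
        rw [if_pos this] at hvr; omega
      · have := hall j h' hu
        split_ifs at this hvr <;> omega

-- ----- digit sums -----

theorem digitChar_val (r : Nat) (h : r < 10) : pyDigitInt (Nat.digitChar r) = r := by
  interval_cases r <;> decide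

theorem digits_sum_pos : ∀ n : Nat, 1 ≤ n → 1 ≤ (Nat.digits 10 n).sum := by
  intro n
  induction n using Nat.strong_induction_on with
  | _ n ih =>
    intro hn
    rw [Nat.digits_def' (by norm_num : 1 < 10) (by omega)]
    by_cases h : n / 10 = 0
    · simp [h]; omega
    · have := ih (n / 10) (by omega) (by omega)
      simp; omega

theorem toDigitsCore_sum :
    ∀ (fuel n : Nat) (ds : List Char), n < fuel →
      ((Nat.toDigitsCore 10 fuel n ds).map pyDigitInt).sum
        = ((Nat.digits 10 n).sum : Int) + ((ds.map pyDigitInt)).sum := by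
  intro fuel
  induction fuel with
  | zero => intro n ds h; omega
  | succ f ih =>
    intro n ds h
    show ((if n / 10 = 0 then (n % 10).digitChar :: ds
        else Nat.toDigitsCore 10 f (n / 10) ((n % 10).digitChar :: ds)).map pyDigitInt).sum = _
    by_cases h0 : n / 10 = 0
    · rw [if_pos h0]
      simp only [List.map_cons, List.sum_cons, digitChar_val (n % 10) (by omega)]
      by_cases hn : n = 0
      · subst hn; simp
      · rw [Nat.digits_def' (by norm_num : 1 < 10) (by omega), h0]
        simp
    · rw [if_neg h0]
      rw [ih (n / 10) _ (by omega)]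
      have hdn : Nat.digits 10 n = n % 10 :: Nat.digits 10 (n / 10) :=
        Nat.digits_def' (by norm_num : 1 < 10) (show 0 < n by omega)
      rw [hdn]
      simp only [List.map_cons, List.sum_cons, digitChar_val (n % 10) (by omega)]
      push_cast
      ring

theorem strDigitSum_eq (v : Int) (hv : 0 ≤ v) :
    strDigitSum v = ((Nat.digits 10 v.toNat).sum : Int) := by
  unfold strDigitSum
  rw [PySem.Int.toList_toStr, PySem.List.foldl_add]
  have hch : PySem.Int.toChars v = Nat.toDigits 10 v.toNat := by
    simp [PySem.Int.toChars, not_lt.mpr hv]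
  rw [hch]
  have := toDigitsCore_sum (v.toNat + 1) v.toNat [] (by omega)
  simp only [List.map_nil, List.sum_nil, add_zero] at this
  rw [show Nat.toDigits 10 v.toNat = Nat.toDigitsCore 10 (v.toNat + 1) v.toNat [] from rfl, this]
  ring

theorem digSumB_eq :
    ∀ (fuel : Nat) (n s : Int), 0 ≤ n → n.toNat < fuel →
      digSumB fuel n s = s + ((Nat.digits 10 n.toNat).sum : Int) := by
  intro fuel
  induction fuel with
  | zero => intro n s h0 h1; omega
  | succ f ih =>
    intro n s h0 h1
    by_cases hn : n = 0
    · subst hn; simp [digSumB]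
    · rw [show digSumB (f + 1) n s
          = if n ≠ 0 then digSumB f (PySem.Int.floordiv n 10) (s + PySem.Int.mod n 10) else s from rfl,
        if_pos hn]
      have hfd : PySem.Int.floordiv n 10 = n / 10 :=
        PySem.Int.floordiv_eq_ediv_of_pos (by norm_num)
      have hmd : PySem.Int.mod n 10 = n % 10 := by
        simp [PySem.Int.mod, Int.fmod_eq_emod_of_nonneg]
      rw [hfd, hmd, ih (n / 10) _ (by positivity) (by omega)]
      have hdn : Nat.digits 10 n.toNat = n.toNat % 10 :: Nat.digits 10 (n.toNat / 10) :=
        Nat.digits_def' (by norm_num : 1 < 10) (show 0 < n.toNat by omega)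
      rw [hdn]
      have h10 : (n / 10).toNat = n.toNat / 10 := by omega
      have hm10 : n % 10 = ((n.toNat % 10 : Nat) : Int) := by omega
      rw [h10, hm10]
      simp only [List.sum_cons]
      push_cast
      ring

theorem redA_eq_redB : ∀ (fuel : Nat) (v : Int), 1 ≤ v → redA fuel v = redB fuel v := by
  intro fuel
  induction fuel with
  | zero => intro v _; rfl
  | succ f ih =>
    intro v hv
    by_cases h9 : v ≤ 9
    · have hA : v ∈ ALGARISMOS := by simp [ALGARISMOS]; omega
      rw [show redA (f + 1) v = if v ∈ ALGARISMOS then v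
          else if v ∉ MESTRES then redA f (strDigitSum v) else v from rfl, if_pos hA]
      rw [show redB (f + 1) v = if v > 9 ∧ ¬(PySem.Int.mod v 11 = 0 ∧ v ≤ 99) then
          redB f (digSumB (v.toNat + 1) v 0) else v from rfl, if_neg (by rintro ⟨h, -⟩; omega)]
    · have hmod : PySem.Int.mod v 11 = v % 11 := by
        simp [PySem.Int.mod, Int.fmod_eq_emod_of_nonneg]
      have hA : v ∉ ALGARISMOS := by simp [ALGARISMOS]; omega
      by_cases hm : v % 11 = 0 ∧ v ≤ 99
      · have hM : v ∈ MESTRES := by simp [MESTRES]; omega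
        rw [show redA (f + 1) v = if v ∈ ALGARISMOS then v
            else if v ∉ MESTRES then redA f (strDigitSum v) else v from rfl,
          if_neg hA, if_neg (not_not_intro hM)]
        rw [show redB (f + 1) v = if v > 9 ∧ ¬(PySem.Int.mod v 11 = 0 ∧ v ≤ 99) then
            redB f (digSumB (v.toNat + 1) v 0) else v from rfl,
          if_neg (by rw [hmod]; tauto)]
      · have hM : v ∉ MESTRES := by simp [MESTRES]; omega
        rw [show redA (f + 1) v = if v ∈ ALGARISMOS then v
            else if v ∉ MESTRES then redA f (strDigitSum v) else v from rfl,
          if_neg hA, if_pos hM]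
        rw [show redB (f + 1) v = if v > 9 ∧ ¬(PySem.Int.mod v 11 = 0 ∧ v ≤ 99) then
            redB f (digSumB (v.toNat + 1) v 0) else v from rfl,
          if_pos (by rw [hmod]; exact ⟨by omega, hm⟩)]
        rw [strDigitSum_eq v (by omega), digSumB_eq (v.toNat + 1) v 0 (by omega) (by omega)]
        rw [zero_add]
        exact ih _ (by exact_mod_cast digits_sum_pos v.toNat (by omega))
  -- note: positivity of digit sum feeds the induction hypothesis

-- ===== VERDICT (by name: the statement is the Claim_ definition above) =====
theorem verificar_vogais_spec : Claim_equal_verificar_vogais := by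
  intro nome sw _ hpre
  obtain ⟨hw, hpos⟩ := hpre
  unfold Spec_verificar_vogais verificar_vogais verificar_vogais_alt
  have hcnt : ∀ c : Char,
      ((nome.toList.foldl (fun d letra => d.modify letra 0 (· + 1))
        (PySem.Dict.empty : PySem.Dict Char Int)).getD c 0) = (nome.toList.count c : Int) := by
    intro c
    rw [← PySem.Dict.counter_eq_foldl]
    exact PySem.Dict.getD_counter nome.toList c
  simp only [hcnt]
  rw [sumVal_eq_counts]
  rw [loopA_eq sw nome.toList 0 0 (le_refl 0), zero_add, zero_add]
  obtain ⟨r, hr, hvr, hall⟩ := wLoopB_spec sw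
      (PySem.List.pyRange 0 (nome.toList.count 'w') 1) (sumVal nome.toList)
      (by
        intro i hi
        rw [PySem.List.mem_pyRange_one] at hi
        constructor
        · exact hi.1
        · calc i < (nome.toList.count 'w' : Int) := hi.2
            _ ≤ (sw.length : Int) := by exact_mod_cast hw)
  rw [hr]
  show redA (r.toNat + 1) r = redB (r.toNat + 1) r
  apply redA_eq_redB
  rcases hpos with hv | ⟨j, hj, hu⟩
  · have h2 := sumVal_eq_counts nome.toList
    push_cast at h2
    omega
  · rw [List.mem_range] at hj
    have hmem : (j : Int) ∈ PySem.List.pyRange 0 (nome.toList.count 'w') 1 := by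
      rw [PySem.List.mem_pyRange_one]
      constructor
      · positivity
      · exact_mod_cast hj
    have h3 := hall (j : Int) hmem (by rw [Int.toNat_natCast]; exact hu)
    have := sumVal_nonneg nome.toList
    omega
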